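-- pv_equiv track=rewrite | github.com/VinTeK/Interactive-Vigenere-Cipher | vigenere.py | getPosFromIndex
-- ===== SOURCE A (Python) =====
-- import collections, curses, itertools, re, string, sys, textwrap
--
-- def getPosFromIndex(xss, index):
--     """ Return a (row, col) pair corresponding to an index into a 2D list. """
--     if index < 0 or index >= sum(map(len, xss)):
--         return None
--
--     r, tmp = 0, [0]
--     tmp.extend(itertools.accumulate(map(len, xss)))
--     for i in range(len(tmp)-1):
--         if index in range(tmp[i], tmp[i+1]):
--             r = i
--     return r, index - sum(map(len, xss[:r]))
-- ===== SOURCE B (Python) =====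
-- def getPosFromIndex(xss, index):
--     """ Return a (row, col) pair corresponding to an index into a 2D list. """
--     if index < 0 or index >= sum(len(xs) for xs in xss):
--         return None
--     for i, xs in enumerate(xss):
--         if index < len(xs):
--             return (i, index)
--         index -= len(xs)
-- ===== Notes on version B (the rewrite author's own statement) =====
-- stated objective: simpler
-- what changed: Replaced the prefix-sum array plus full range-membership scan plus recomputed partial sum with a single walk over the rows that keeps the index as a running remainder and returns early.
import Mathlib
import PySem

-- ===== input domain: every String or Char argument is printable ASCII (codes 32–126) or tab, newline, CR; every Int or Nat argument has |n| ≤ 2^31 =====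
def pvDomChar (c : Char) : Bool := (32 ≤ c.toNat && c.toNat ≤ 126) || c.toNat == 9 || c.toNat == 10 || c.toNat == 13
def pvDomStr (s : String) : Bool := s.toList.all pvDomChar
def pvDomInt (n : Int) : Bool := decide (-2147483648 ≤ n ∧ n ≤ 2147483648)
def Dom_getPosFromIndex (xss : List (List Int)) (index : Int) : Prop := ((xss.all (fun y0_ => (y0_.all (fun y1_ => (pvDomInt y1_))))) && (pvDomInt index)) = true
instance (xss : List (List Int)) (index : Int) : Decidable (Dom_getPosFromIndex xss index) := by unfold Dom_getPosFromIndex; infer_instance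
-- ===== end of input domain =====

-- B replaces A's prefix-sum array, range-membership scan and recomputed partial sum
-- with a single walk-and-subtract pass over the rows (objective: simpler).

-- ===== PORT A =====
-- itertools.accumulate(map(len, xss)) starting from running total `acc`
def pvAccum (acc : Int) : List Int → List Int
  | [] => []
  | x :: xs => (acc + x) :: pvAccum (acc + x) xs

def getPosFromIndex (xss : List (List Int)) (index : Int) : Option (Int × Int) :=
  let lens : List Int := xss.map (fun xs => (xs.length : Int))
  if index < 0 ∨ lens.sum ≤ index then none
  else
    let tmp : List Int := 0 :: pvAccum 0 lens
    let r : Nat := (List.range (tmp.length - 1)).foldl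
      (fun r i => if tmp.getD i 0 ≤ index ∧ index < tmp.getD (i+1) 0 then i else r) 0
    some ((r : Int), index - ((xss.take r).map (fun xs => (xs.length : Int))).sum)

-- ===== PORT B =====
-- the `for i, xs in enumerate(xss)` loop with the running remainder
def altGo (i : Int) (index : Int) : List (List Int) → Option (Int × Int)
  | [] => none
  | xs :: rest =>
      if index < (xs.length : Int) then some (i, index)
      else altGo (i + 1) (index - (xs.length : Int)) rest

def getPosFromIndex_alt (xss : List (List Int)) (index : Int) : Option (Int × Int) :=
  if index < 0 ∨ (xss.map (fun xs => (xs.length : Int))).sum ≤ index then none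
  else altGo 0 index xss

-- ===== PRECONDITION & SPEC =====
def Spec_getPosFromIndex (xss : List (List Int)) (index : Int) (out : Option (Int × Int)) : Prop := out = getPosFromIndex_alt xss index
instance (xss : List (List Int)) (index : Int) (out : Option (Int × Int)) : Decidable (Spec_getPosFromIndex xss index out) := by unfold Spec_getPosFromIndex; infer_instance

-- ===== CLAIM (what is proved, stated in full; the proofs are below) =====
def Claim_equal_getPosFromIndex : Prop := ∀ (xss : List (List Int)) (index : Int), Dom_getPosFromIndex xss index → Spec_getPosFromIndex xss index (getPosFromIndex xss index)

-- ===== LEMMAS AND PROOFS =====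

-- reference row: the row B's walk lands in, computed over the list of row lengths
def rowOf : List Int → Int → Nat
  | [], _ => 0
  | a :: ls, idx => if idx < a then 0 else rowOf ls (idx - a) + 1

theorem pvAccum_length (acc : Int) (ls : List Int) : (pvAccum acc ls).length = ls.length := by
  induction ls generalizing acc with
  | nil => rfl
  | cons a ls ih => simp [pvAccum, ih]

theorem pvAccum_getD (acc : Int) (ls : List Int) (i : Nat) (hi : i ≤ ls.length) :
    (acc :: pvAccum acc ls).getD i 0 = acc + (ls.take i).sum := by
  induction ls generalizing acc i with
  | nil =>
    cases i with
    | zero => simp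
    | succ i => simp at hi
  | cons a ls ih =>
    cases i with
    | zero => simp
    | succ i =>
      have := ih (acc + a) i (by simpa using hi)
      simpa [pvAccum, List.take_succ_cons, add_assoc] using this

theorem sum_take_mono {ls : List Int} (hnn : ∀ x ∈ ls, 0 ≤ x) {i j : Nat} (hij : i ≤ j) :
    (ls.take i).sum ≤ (ls.take j).sum := by
  induction ls generalizing i j with
  | nil => simp
  | cons a ls ih =>
    cases i with
    | zero =>
      simp only [List.take_zero, List.sum_nil]
      cases j with
      | zero => simp
      | succ j =>
        have h1 : 0 ≤ a := hnn a (by simp)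
        have h2 : (0:Int) ≤ (ls.take j).sum :=
          List.sum_nonneg (fun x hx =>
            hnn x (List.mem_cons_of_mem _ (List.mem_of_mem_take hx)))
        simp only [List.take_succ_cons, List.sum_cons]; omega
    | succ i =>
      cases j with
      | zero => omega
      | succ j =>
        have := ih (fun x hx => hnn x (by simp [hx])) (Nat.succ_le_succ_iff.mp hij)
        simp only [List.take_succ_cons, List.sum_cons]; omega

theorem rowOf_spec {ls : List Int} (hnn : ∀ x ∈ ls, 0 ≤ x) {idx : Int}
    (h0 : 0 ≤ idx) (h1 : idx < ls.sum) :
    rowOf ls idx < ls.length ∧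
      (ls.take (rowOf ls idx)).sum ≤ idx ∧ idx < (ls.take (rowOf ls idx + 1)).sum := by
  induction ls generalizing idx with
  | nil => simp at h1; omega
  | cons a ls ih =>
    by_cases h : idx < a
    · simp [rowOf, h]; omega
    · have hrec := ih (idx := idx - a) (fun x hx => hnn x (by simp [hx])) (by omega)
        (by simp only [List.sum_cons] at h1; omega)
      simp only [rowOf, if_neg h, List.length_cons, List.take_succ_cons, List.sum_cons]
      obtain ⟨hr1, hr2, hr3⟩ := hrec
      refine ⟨by omega, by omega, by omega⟩

-- the foldl returns the unique index satisfying the predicate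
theorem foldl_pick {P : Nat → Prop} [DecidablePred P] (n j a : Nat) (hj : j < n) (hPj : P j)
    (huniq : ∀ i, i < n → P i → i = j) :
    (List.range n).foldl (fun r i => if P i then i else r) a = j := by
  induction n generalizing a with
  | zero => omega
  | succ n ih =>
    rw [List.range_succ, List.foldl_append]
    simp only [List.foldl_cons, List.foldl_nil]
    by_cases hn : P n
    · rw [if_pos hn]
      exact (huniq n (by omega) hn).symm ▸ rfl
    · have hjn : j ≠ n := fun h => hn (h ▸ hPj)
      rw [if_neg hn]
      exact ih a (by omega) (fun i hi hPi => huniq i (by omega) hPi)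

-- B's walk in closed form
theorem altGo_eq (xss : List (List Int)) (i idx : Int) (h0 : 0 ≤ idx)
    (h1 : idx < (xss.map (fun xs => (xs.length : Int))).sum) :
    altGo i idx xss =
      some (i + (rowOf (xss.map (fun xs => (xs.length : Int))) idx : Int),
            idx - ((xss.map (fun xs => (xs.length : Int))).take
                    (rowOf (xss.map (fun xs => (xs.length : Int))) idx)).sum) := by
  induction xss generalizing i idx with
  | nil => simp at h1; omega
  | cons xs rest ih =>
    by_cases h : idx < (xs.length : Int)
    · simp [altGo, h, rowOf]
    · have hrec := ih (i + 1) (idx - xs.length) (by omega)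
        (by simp [List.sum_cons] at h1 ⊢; omega)
      simp only [altGo, if_neg h, hrec, List.map_cons, rowOf,
        List.take_succ_cons, List.sum_cons, Option.some.injEq, Prod.mk.injEq]
      refine ⟨by push_cast; ring, by omega⟩

theorem getPosFromIndex_eq_alt (xss : List (List Int)) (index : Int) :
    getPosFromIndex xss index = getPosFromIndex_alt xss index := by
  unfold getPosFromIndex getPosFromIndex_alt
  set lens : List Int := xss.map (fun xs => (xs.length : Int)) with hlens
  by_cases hguard : index < 0 ∨ lens.sum ≤ index
  · simp [hguard]
  · rw [if_neg hguard, if_neg hguard]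
    simp only [not_or, not_lt, not_le] at hguard
    obtain ⟨h0, h1⟩ := hguard
    have hnn : ∀ x ∈ lens, 0 ≤ x := by
      intro x hx
      simp only [hlens, List.mem_map] at hx
      obtain ⟨xs, _, rfl⟩ := hx
      exact Int.natCast_nonneg _
    obtain ⟨hlt, hlo, hhi⟩ := rowOf_spec hnn h0 h1
    rw [altGo_eq xss 0 index h0 (by rw [← hlens]; omega), ← hlens]
    -- identify the fold result with rowOf
    have htmplen : (0 :: pvAccum 0 lens).length - 1 = lens.length := by
      simp [pvAccum_length]
    have hfold : (List.range ((0 :: pvAccum 0 lens).length - 1)).foldl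
        (fun r i => if (0 :: pvAccum 0 lens).getD i 0 ≤ index ∧
            index < (0 :: pvAccum 0 lens).getD (i+1) 0 then i else r) 0
        = rowOf lens index := by
      rw [htmplen]
      refine foldl_pick lens.length (rowOf lens index) 0 hlt ?_ ?_
      · rw [pvAccum_getD 0 lens _ (by omega), pvAccum_getD 0 lens _ (by omega)]
        constructor <;> omega
      · intro i hi hPi
        rw [pvAccum_getD 0 lens _ (by omega), pvAccum_getD 0 lens _ (by omega)] at hPi
        by_contra hne
        rcases Nat.lt_or_ge i (rowOf lens index) with hlt' | hge
        · have : (lens.take (i+1)).sum ≤ (lens.take (rowOf lens index)).sum :=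
            sum_take_mono hnn (by omega)
          omega
        · have hgt : rowOf lens index < i := by omega
          have : (lens.take (rowOf lens index + 1)).sum ≤ (lens.take i).sum :=
            sum_take_mono hnn (by omega)
          omega
    simp only [hfold]
    congr 2
    · omega
    · rw [List.map_take]

-- ===== VERDICT (by name: the statement is the Claim_ definition above) =====
theorem getPosFromIndex_spec : Claim_equal_getPosFromIndex := by
  intro xss index _
  unfold Spec_getPosFromIndex
  exact getPosFromIndex_eq_alt xss index
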